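-- pv_equiv track=rewrite | github.com/alexandreandre/beta_test | backend_calculs/HTML/check_changement_du_html.py | decide_units_to_highlight
-- ===== SOURCE A (Python) =====
-- from collections import Counter
--
-- def decide_units_to_highlight(local_units, remote_units):
--     c_local = Counter(u["key"] for u in local_units)
--     c_remote = Counter(u["key"] for u in remote_units)
--
--     surplus_local = {k: max(0, c_local[k] - c_remote.get(k, 0)) for k in c_local}
--     surplus_remote = {k: max(0, c_remote[k] - c_local.get(k, 0)) for k in c_remote}
--
--     mark_local, mark_remote = set(), set()
--
--     rem = surplus_local.copy()
--     for i, u in enumerate(local_units):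
--         k = u["key"]
--         if rem.get(k, 0) > 0:
--             mark_local.add(i)
--             rem[k] -= 1
--
--     rem = surplus_remote.copy()
--     for i, u in enumerate(remote_units):
--         k = u["key"]
--         if rem.get(k, 0) > 0:
--             mark_remote.add(i)
--             rem[k] -= 1
--
--     # --- Ajout: si un côté a marqué, marquer aussi l’autre côté sur le même "key" ---
--     keys_local = {local_units[i]["key"] for i in mark_local}
--     keys_remote = {remote_units[i]["key"] for i in mark_remote}
--     all_diff_keys = keys_local | keys_remote
--
--     for i, u in enumerate(local_units):
--         if u["key"] in all_diff_keys:
--             mark_local.add(i)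
--     for i, u in enumerate(remote_units):
--         if u["key"] in all_diff_keys:
--             mark_remote.add(i)
--
--     return mark_local, mark_remote
-- ===== SOURCE B (Python) =====
-- from collections import Counter
--
-- def decide_units_to_highlight(local_units, remote_units):
--     c_local = Counter(u["key"] for u in local_units)
--     c_remote = Counter(u["key"] for u in remote_units)
--     changed = {k for k in c_local.keys() | c_remote.keys()
--                if c_local[k] != c_remote[k]}
--     mark_local = {i for i, u in enumerate(local_units) if u["key"] in changed}
--     mark_remote = {i for i, u in enumerate(remote_units) if u["key"] in changed}
--     return mark_local, mark_remote
-- ===== Notes on version B (the rewrite author's own statement) =====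
-- stated objective: simpler
-- what changed: B replaces A's surplus dictionaries, decrement-based marking passes and the marked-key set-union re-marking passes by one Counter comparison (the set of keys whose counts differ) and a single membership pass per side; Pre_ excludes only inputs where some unit lacks a "key" entry, on which A raises KeyError (and so does B).
import Mathlib
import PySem

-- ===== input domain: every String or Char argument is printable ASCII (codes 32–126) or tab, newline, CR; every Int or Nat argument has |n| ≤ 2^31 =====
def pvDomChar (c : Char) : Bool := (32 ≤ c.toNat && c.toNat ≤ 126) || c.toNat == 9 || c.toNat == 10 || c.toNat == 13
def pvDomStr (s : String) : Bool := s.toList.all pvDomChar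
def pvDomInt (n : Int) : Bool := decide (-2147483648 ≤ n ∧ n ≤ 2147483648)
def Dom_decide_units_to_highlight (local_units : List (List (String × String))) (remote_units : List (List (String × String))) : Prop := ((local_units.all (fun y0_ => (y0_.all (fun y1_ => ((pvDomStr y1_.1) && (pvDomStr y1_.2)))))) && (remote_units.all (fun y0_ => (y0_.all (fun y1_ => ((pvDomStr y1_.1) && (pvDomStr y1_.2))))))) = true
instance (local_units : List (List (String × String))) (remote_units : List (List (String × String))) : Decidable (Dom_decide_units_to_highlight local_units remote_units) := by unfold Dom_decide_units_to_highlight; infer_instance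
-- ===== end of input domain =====

-- B replaces A's surplus dicts, decrement marking passes and key-set re-marking passes by one
-- "changed keys" set and a single membership pass per side (objective: simpler).
-- Both functions RETURN Python sets of ints, which are unordered; both ports represent such a
-- set by its sorted element list (sAdd inserts in order; B's ascending pass is sorted already).

-- ===== PORT A =====
-- u["key"]: raises KeyError when "key" is absent; Pre_ requires presence, so the "" default is never used there.
def pvKey (u : List (String × String)) : String := (PySem.Dict.mk u).getD "key" ""

-- sorted-list representative of a Python int set: insert i in order, skip if present
def sAdd : List Int → Int → List Int
  | [], i => [i]
  | x :: t, i => if i < x then i :: x :: t else if i = x then x :: t else x :: sAdd t i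

-- {k: max(0, c_U[k] - c_V.get(k, 0)) for k in c_U}
def pvSurplus (U V : List (List (String × String))) : PySem.Dict String Int :=
  (PySem.Dict.counter (U.map (fun u => pvKey u))).keys.foldl
    (fun d k => d.insert k (max 0 ((PySem.Dict.counter (U.map (fun u => pvKey u))).getD k 0
      - (PySem.Dict.counter (V.map (fun u => pvKey u))).getD k 0)))
    PySem.Dict.empty

-- rem = surplus.copy(); for i, u in enumerate(U): if rem.get(k,0) > 0: mark i; rem[k] -= 1
def pvP1 (U V : List (List (String × String))) : List Int :=
  ((PySem.List.enumerate U 0).foldl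
    (fun s iu => if s.2.getD (pvKey iu.2) 0 > 0 then (sAdd s.1 iu.1, s.2.modify (pvKey iu.2) 0 (fun v => v - 1)) else s)
    (([] : List Int), pvSurplus U V)).1

-- for i, u in enumerate(U): if u["key"] in all_diff_keys: mark.add(i)
def pvP2 (U : List (List (String × String))) (adk : PySem.Set String) (s0 : List Int) : List Int :=
  (PySem.List.enumerate U 0).foldl
    (fun s iu => if PySem.Set.contains adk (pvKey iu.2) then sAdd s iu.1 else s) s0

def decide_units_to_highlight (local_units : List (List (String × String))) (remote_units : List (List (String × String))) : List Int × List Int :=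
  let mark_local := pvP1 local_units remote_units
  let mark_remote := pvP1 remote_units local_units
  let keys_local := PySem.Set.ofList (mark_local.map (fun i => pvKey (PySem.List.pyGetD local_units i [])))
  let keys_remote := PySem.Set.ofList (mark_remote.map (fun i => pvKey (PySem.List.pyGetD remote_units i [])))
  let all_diff_keys := PySem.Set.union keys_local keys_remote
  (pvP2 local_units all_diff_keys mark_local, pvP2 remote_units all_diff_keys mark_remote)

-- ===== PORT B =====
-- changed = {k for k in c_local.keys() | c_remote.keys() if c_local[k] != c_remote[k]}
def pvChanged (L R : List (List (String × String))) : List String :=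
  (PySem.Set.union (PySem.Dict.counter (L.map (fun u => pvKey u))).keys
      (PySem.Dict.counter (R.map (fun u => pvKey u))).keys).filter
    (fun k => (PySem.Dict.counter (L.map (fun u => pvKey u))).getD k 0
      != (PySem.Dict.counter (R.map (fun u => pvKey u))).getD k 0)

-- {i for i, u in enumerate(U) if u["key"] in changed}
def pvMarkB (U : List (List (String × String))) (chg : List String) : List Int :=
  (PySem.List.enumerate U 0).foldl
    (fun s iu => if PySem.Set.contains chg (pvKey iu.2) then PySem.Set.add s iu.1 else s) ([] : List Int)

def decide_units_to_highlight_alt (local_units : List (List (String × String))) (remote_units : List (List (String × String))) : List Int × List Int :=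
  let changed := pvChanged local_units remote_units
  (pvMarkB local_units changed, pvMarkB remote_units changed)

-- ===== PRECONDITION & SPEC =====
-- Pre_ excludes exactly the inputs where some unit has no "key" entry: there Python A raises KeyError (and so does B).
def Pre_decide_units_to_highlight (local_units : List (List (String × String))) (remote_units : List (List (String × String))) : Prop :=
  (∀ u ∈ local_units, ((PySem.Dict.mk u).get? "key").isSome = true) ∧
  (∀ u ∈ remote_units, ((PySem.Dict.mk u).get? "key").isSome = true)
instance (local_units : List (List (String × String))) (remote_units : List (List (String × String))) : Decidable (Pre_decide_units_to_highlight local_units remote_units) := by unfold Pre_decide_units_to_highlight; infer_instance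
def pvWitness_decide_units_to_highlight : (List (List (String × String))) × (List (List (String × String))) := ([[("key", "a")]], [[("key", "b")]])

def Spec_decide_units_to_highlight (local_units : List (List (String × String))) (remote_units : List (List (String × String))) (out : List Int × List Int) : Prop := out = decide_units_to_highlight_alt local_units remote_units
instance (local_units : List (List (String × String))) (remote_units : List (List (String × String))) (out : List Int × List Int) : Decidable (Spec_decide_units_to_highlight local_units remote_units out) := by unfold Spec_decide_units_to_highlight; infer_instance

-- ===== CLAIM (what is proved, stated in full; the proofs are below) =====
def Claim_equal_decide_units_to_highlight : Prop := ∀ (local_units : List (List (String × String))) (remote_units : List (List (String × String))), Dom_decide_units_to_highlight local_units remote_units → Pre_decide_units_to_highlight local_units remote_units → Spec_decide_units_to_highlight local_units remote_units (decide_units_to_highlight local_units remote_units)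

-- ===== LEMMAS AND PROOFS =====

def pvCnt (X : List (List (String × String))) (k : String) : Int := ((X.map (fun u => pvKey u)).count k : Int)

theorem mem_sAdd (s : List Int) (i j : Int) : j ∈ sAdd s i ↔ j = i ∨ j ∈ s := by
  induction s with
  | nil => simp [sAdd]
  | cons x t ih =>
    simp only [sAdd]
    split_ifs with h1 h2
    · simp only [List.mem_cons]
    · subst h2; simp only [List.mem_cons]; tauto
    · simp only [List.mem_cons, ih]; tauto

theorem pairwise_sAdd (s : List Int) (i : Int) (hs : s.Pairwise (· < ·)) : (sAdd s i).Pairwise (· < ·) := by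
  induction s with
  | nil => simp [sAdd]
  | cons x t ih =>
    rw [List.pairwise_cons] at hs
    obtain ⟨hx, ht⟩ := hs
    simp only [sAdd]
    split_ifs with h1 h2
    · exact List.pairwise_cons.mpr ⟨by intro a ha; rcases List.mem_cons.mp ha with h | h; omega; exact lt_trans h1 (hx a h), List.pairwise_cons.mpr ⟨hx, ht⟩⟩
    · subst h2; exact List.pairwise_cons.mpr ⟨hx, ht⟩
    · refine List.pairwise_cons.mpr ⟨?_, ih ht⟩
      intro a ha
      rcases (mem_sAdd t i a).mp ha with h | h
      · omega
      · exact hx a h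

theorem sAdd_append (s : List Int) (i : Int) (h : ∀ x ∈ s, x < i) : sAdd s i = s ++ [i] := by
  induction s with
  | nil => simp [sAdd]
  | cons x t ih =>
    have hx := h x List.mem_cons_self
    simp only [sAdd]
    rw [if_neg (by omega), if_neg (by omega), ih (fun y hy => h y (List.mem_cons_of_mem _ hy))]
    simp

theorem sortedUnique : ∀ (s t : List Int), s.Pairwise (· < ·) → t.Pairwise (· < ·) → (∀ x, x ∈ s ↔ x ∈ t) → s = t := by
  intro s
  induction s with
  | nil =>
    intro t _ _ h
    cases t with
    | nil => rfl
    | cons y ys => exact absurd ((h y).mpr List.mem_cons_self) (by simp)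
  | cons x xs ih =>
    intro t hs ht h
    cases t with
    | nil => exact absurd ((h x).mp List.mem_cons_self) (by simp)
    | cons y ys =>
      have hxy : x = y := by
        rcases List.mem_cons.mp ((h x).mp List.mem_cons_self) with h1 | h1
        · exact h1
        · rcases List.mem_cons.mp ((h y).mpr List.mem_cons_self) with h2 | h2
          · exact h2.symm
          · have := (List.pairwise_cons.mp ht).1 x h1
            have := (List.pairwise_cons.mp hs).1 y h2
            omega
      subst hxy
      have hxs := (List.pairwise_cons.mp hs).1
      have hys := (List.pairwise_cons.mp ht).1
      have : xs = ys := by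
        refine ih ys (List.pairwise_cons.mp hs).2 (List.pairwise_cons.mp ht).2 ?_
        intro z
        constructor
        · intro hz
          rcases List.mem_cons.mp ((h z).mp (List.mem_cons_of_mem _ hz)) with h1 | h1
          · subst h1; exact absurd (hxs z hz) (by omega)
          · exact h1
        · intro hz
          rcases List.mem_cons.mp ((h z).mpr (List.mem_cons_of_mem _ hz)) with h1 | h1
          · subst h1; exact absurd (hys z hz) (by omega)
          · exact h1
      rw [this]

theorem pvSurplus_getD (U V : List (List (String × String))) (x : String) :
    (pvSurplus U V).getD x 0 = max 0 (pvCnt U x - pvCnt V x) := by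
  unfold pvSurplus pvCnt
  set xs := U.map (fun u => pvKey u) with hxs
  set ys := V.map (fun u => pvKey u) with hys
  have hnd : (PySem.Dict.counter xs).keys.Nodup := PySem.Dict.nodup_keys_counter xs
  have hie : (PySem.Dict.empty : PySem.Dict String Int).items = [] := rfl
  have hitems := PySem.Dict.items_foldl_insert_fresh
      (l := (PySem.Dict.counter xs).keys) (d := (PySem.Dict.empty : PySem.Dict String Int))
      (k := fun a => a)
      (v := fun a => max 0 ((PySem.Dict.counter xs).getD a 0 - (PySem.Dict.counter ys).getD a 0))
      (by intro a _; simp [PySem.Dict.contains_empty]) (by simp only [List.map_id']; exact hnd)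
  rw [hie, List.nil_append] at hitems
  by_cases hx : x ∈ (PySem.Dict.counter xs).keys
  · have hknd : ((PySem.Dict.counter xs).keys.foldl
        (fun d k => d.insert k (max 0 ((PySem.Dict.counter xs).getD k 0 - (PySem.Dict.counter ys).getD k 0)))
        PySem.Dict.empty).keys.Nodup :=
      PySem.Dict.nodup_keys_foldl_insert _ _ _ PySem.Dict.nodup_keys_empty
    have hmem : (x, max 0 ((PySem.Dict.counter xs).getD x 0 - (PySem.Dict.counter ys).getD x 0))
        ∈ ((PySem.Dict.counter xs).keys.foldl
            (fun d k => d.insert k (max 0 ((PySem.Dict.counter xs).getD k 0 - (PySem.Dict.counter ys).getD k 0)))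
            PySem.Dict.empty).items := by
      rw [hitems]
      exact List.mem_map.mpr ⟨x, hx, rfl⟩
    rw [PySem.Dict.getD_of_mem_items _ hmem hknd 0, PySem.Dict.getD_counter, PySem.Dict.getD_counter]
  · have hcf : ((PySem.Dict.counter xs).keys.foldl
        (fun d k => d.insert k (max 0 ((PySem.Dict.counter xs).getD k 0 - (PySem.Dict.counter ys).getD k 0)))
        PySem.Dict.empty).contains x = false := by
      rw [← Bool.not_eq_true]
      intro hc
      have hm := (PySem.Dict.contains_iff_mem_keys _ _).mp hc
      rw [PySem.Dict.keys_foldl_insert, PySem.Dict.keys_empty, PySem.Set.update_nil_left] at hm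
      exact hx ((PySem.Set.mem_ofList _ _).mp hm)
    rw [PySem.Dict.getD_of_not_contains _ 0 hcf]
    have hxx : x ∉ xs := by
      rw [PySem.Dict.keys_counter] at hx
      exact fun h => hx ((PySem.Set.mem_ofList _ _).mpr h)
    rw [List.count_eq_zero.mpr hxx, max_eq_left (by omega)]

theorem phase1_fold (cl cr : String → Int) :
    ∀ (l : List (Int × List (String × String))) (s0 : List Int) (rem : PySem.Dict String Int),
    (∀ x ∈ s0, ∀ p ∈ l, x < p.1) →
    l.Pairwise (fun p q => p.1 < q.1) →
    (∀ k, rem.getD k 0 ≤ max 0 (cl k - cr k)) →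
    ∃ sel : List (Int × List (String × String)), sel.Sublist l ∧
      (l.foldl (fun s iu => if s.2.getD (pvKey iu.2) 0 > 0 then (sAdd s.1 iu.1, s.2.modify (pvKey iu.2) 0 (fun v => v - 1)) else s) (s0, rem)).1 = s0 ++ sel.map (·.1) ∧
      (∀ p ∈ sel, cr (pvKey p.2) < cl (pvKey p.2)) ∧
      (∀ k, 0 < rem.getD k 0 → k ∈ l.map (fun p => pvKey p.2) → ∃ p ∈ sel, pvKey p.2 = k) := by
  intro l
  induction l with
  | nil =>
    intro s0 rem _ _ _
    exact ⟨[], List.Sublist.refl _, by simp, by simp, by simp⟩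
  | cons iu t ih =>
    intro s0 rem hs0 hlt hrem
    obtain ⟨hhd, htl⟩ := List.pairwise_cons.mp hlt
    rw [List.foldl_cons]
    by_cases hc : rem.getD (pvKey iu.2) 0 > 0
    · rw [if_pos hc]
      have hstep : sAdd s0 iu.1 = s0 ++ [iu.1] :=
        sAdd_append s0 iu.1 (fun x hx => hs0 x hx iu List.mem_cons_self)
      have hs0' : ∀ x ∈ s0 ++ [iu.1], ∀ p ∈ t, x < p.1 := by
        intro x hx p hp
        rcases List.mem_append.mp hx with h | h
        · exact hs0 x h p (List.mem_cons_of_mem _ hp)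
        · simp only [List.mem_singleton] at h
          subst h; exact hhd p hp
      have hrem' : ∀ k, (rem.modify (pvKey iu.2) 0 (fun v => v - 1)).getD k 0 ≤ max 0 (cl k - cr k) := by
        intro k
        rw [PySem.Dict.getD_modify]
        split_ifs with h
        · subst h; have := hrem (pvKey iu.2); omega
        · exact hrem k
      obtain ⟨sel, hsub, heq, hmark, hcov⟩ := ih (s0 ++ [iu.1]) _ hs0' htl hrem'
      refine ⟨iu :: sel, List.Sublist.cons₂ _ hsub, ?_, ?_, ?_⟩
      · rw [hstep, heq]; simp
      · intro p hp
        rcases List.mem_cons.mp hp with h | h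
        · subst h
          have := hrem (pvKey p.2)
          rcases max_cases 0 (cl (pvKey p.2) - cr (pvKey p.2)) with ⟨he, _⟩ | ⟨he, _⟩ <;> omega
        · exact hmark p h
      · intro k hk hkin
        by_cases hke : k = pvKey iu.2
        · exact ⟨iu, List.mem_cons_self, hke.symm⟩
        · rw [List.map_cons, List.mem_cons] at hkin
          rcases hkin with h | h
          · exact absurd h hke
          · have hk' : 0 < (rem.modify (pvKey iu.2) 0 (fun v => v - 1)).getD k 0 := by
              rw [PySem.Dict.getD_modify, if_neg hke]; exact hk
            obtain ⟨p, hp, hpe⟩ := hcov k hk' h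
            exact ⟨p, List.mem_cons_of_mem _ hp, hpe⟩
    · rw [if_neg hc]
      have hs0' : ∀ x ∈ s0, ∀ p ∈ t, x < p.1 := fun x hx p hp => hs0 x hx p (List.mem_cons_of_mem _ hp)
      obtain ⟨sel, hsub, heq, hmark, hcov⟩ := ih s0 rem hs0' htl hrem
      refine ⟨sel, List.Sublist.cons _ hsub, heq, hmark, ?_⟩
      intro k hk hkin
      by_cases hke : k = pvKey iu.2
      · subst hke; exact absurd hk hc
      · rw [List.map_cons, List.mem_cons] at hkin
        rcases hkin with h | h
        · exact absurd h hke
        · exact hcov k hk h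

theorem pvEnumKeys (xs : List (List (String × String))) :
    (PySem.List.enumerate xs 0).map (fun p => pvKey p.2) = xs.map (fun u => pvKey u) := by
  rw [show (fun p : Int × List (String × String) => pvKey p.2) = (fun u => pvKey u) ∘ (fun p : Int × List (String × String) => p.2) from rfl,
      ← List.map_map, PySem.List.map_snd_enumerate]

theorem pvEnumGet (xs : List (List (String × String))) (p : Int × List (String × String))
    (h : p ∈ PySem.List.enumerate xs 0) : PySem.List.pyGetD xs p.1 [] = p.2 := by
  rw [PySem.List.mem_enumerate_iff] at h
  obtain ⟨k, hk, rfl⟩ := h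
  simp [PySem.List.pyGetD_natCast, List.getElem?_eq_getElem hk]

theorem pvEnumSnd (xs : List (List (String × String))) (p : Int × List (String × String))
    (h : p ∈ PySem.List.enumerate xs 0) : p.2 ∈ xs := by
  rw [PySem.List.mem_enumerate_iff] at h
  obtain ⟨k, hk, rfl⟩ := h
  exact List.getElem_mem hk

theorem pvP1_spec (U V : List (List (String × String))) :
    ∃ sel : List (Int × List (String × String)), sel.Sublist (PySem.List.enumerate U 0) ∧
      pvP1 U V = sel.map (·.1) ∧
      (∀ p ∈ sel, pvCnt V (pvKey p.2) < pvCnt U (pvKey p.2)) ∧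
      (∀ k, k ∈ U.map (fun u => pvKey u) → pvCnt V k < pvCnt U k → ∃ p ∈ sel, pvKey p.2 = k) := by
  obtain ⟨sel, hsub, heq, hmark, hcov⟩ :=
    phase1_fold (pvCnt U) (pvCnt V) (PySem.List.enumerate U 0) [] (pvSurplus U V)
      (by simp) (PySem.List.pairwise_lt_enumerate U 0)
      (fun k => le_of_eq (pvSurplus_getD U V k))
  refine ⟨sel, hsub, ?_, hmark, ?_⟩
  · unfold pvP1; rw [heq]; simp
  · intro k hkU hklt
    refine hcov k ?_ ?_
    · rw [pvSurplus_getD]; omega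
    · rw [pvEnumKeys]; exact hkU

theorem pvP2_mem (adk : PySem.Set String) :
    ∀ (l : List (Int × List (String × String))) (s0 : List Int) (j : Int),
    j ∈ l.foldl (fun s iu => if PySem.Set.contains adk (pvKey iu.2) then sAdd s iu.1 else s) s0 ↔
      j ∈ s0 ∨ ∃ p ∈ l, PySem.Set.contains adk (pvKey p.2) = true ∧ p.1 = j := by
  intro l
  induction l with
  | nil => simp
  | cons iu t ih =>
    intro s0 j
    rw [List.foldl_cons]
    by_cases hc : PySem.Set.contains adk (pvKey iu.2) = true
    · rw [if_pos hc, ih, mem_sAdd]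
      constructor
      · rintro ((h | h) | ⟨p, hp, hpc, hpe⟩)
        · exact Or.inr ⟨iu, List.mem_cons_self, hc, h.symm⟩
        · exact Or.inl h
        · exact Or.inr ⟨p, List.mem_cons_of_mem _ hp, hpc, hpe⟩
      · rintro (h | ⟨p, hp, hpc, hpe⟩)
        · exact Or.inl (Or.inr h)
        · rcases List.mem_cons.mp hp with h | h
          · subst h; exact Or.inl (Or.inl hpe.symm)
          · exact Or.inr ⟨p, h, hpc, hpe⟩
    · rw [if_neg hc, ih]
      constructor
      · rintro (h | ⟨p, hp, hpc, hpe⟩)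
        · exact Or.inl h
        · exact Or.inr ⟨p, List.mem_cons_of_mem _ hp, hpc, hpe⟩
      · rintro (h | ⟨p, hp, hpc, hpe⟩)
        · exact Or.inl h
        · rcases List.mem_cons.mp hp with h | h
          · subst h; exact absurd hpc hc
          · exact Or.inr ⟨p, h, hpc, hpe⟩

theorem pvP2_pairwise (adk : PySem.Set String) :
    ∀ (l : List (Int × List (String × String))) (s0 : List Int), s0.Pairwise (· < ·) →
    (l.foldl (fun s iu => if PySem.Set.contains adk (pvKey iu.2) then sAdd s iu.1 else s) s0).Pairwise (· < ·) := by
  intro l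
  induction l with
  | nil => intro s0 h; exact h
  | cons iu t ih =>
    intro s0 h
    rw [List.foldl_cons]
    split_ifs with hc
    · exact ih _ (pairwise_sAdd s0 iu.1 h)
    · exact ih _ h

theorem pvMarkB_fold (chg : List String) :
    ∀ (l : List (Int × List (String × String))) (s0 : List Int),
    l.Pairwise (fun p q => p.1 < q.1) →
    (∀ x ∈ s0, ∀ p ∈ l, x < p.1) →
    l.foldl (fun s iu => if PySem.Set.contains chg (pvKey iu.2) then PySem.Set.add s iu.1 else s) s0
      = s0 ++ (l.filter (fun p => PySem.Set.contains chg (pvKey p.2))).map (·.1) := by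
  intro l
  induction l with
  | nil => intro s0 _ _; simp
  | cons iu t ih =>
    intro s0 hlt hs0
    obtain ⟨hhd, htl⟩ := List.pairwise_cons.mp hlt
    rw [List.foldl_cons]
    by_cases hc : PySem.Set.contains chg (pvKey iu.2) = true
    · rw [if_pos hc]
      have hnm : iu.1 ∉ s0 := fun h => absurd (hs0 iu.1 h iu List.mem_cons_self) (by omega)
      have hadd : PySem.Set.add s0 iu.1 = s0 ++ [iu.1] := by
        simp [PySem.Set.add, PySem.Set.contains_eq_listContains, hnm]
      have hs0' : ∀ x ∈ s0 ++ [iu.1], ∀ p ∈ t, x < p.1 := by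
        intro x hx p hp
        rcases List.mem_append.mp hx with h | h
        · exact hs0 x h p (List.mem_cons_of_mem _ hp)
        · simp only [List.mem_singleton] at h; subst h; exact hhd p hp
      have hc' : pvKey iu.2 ∈ chg := (PySem.Set.contains_iff _ _).mp hc
      rw [hadd, ih _ htl hs0']
      simp [hc']
    · have hc' : pvKey iu.2 ∉ chg := fun hm => hc ((PySem.Set.contains_iff _ _).mpr hm)
      rw [if_neg hc, ih _ htl (fun x hx p hp => hs0 x hx p (List.mem_cons_of_mem _ hp))]
      simp [hc']

theorem pvChanged_contains (L R : List (List (String × String))) (k : String) :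
    PySem.Set.contains (pvChanged L R) k = true ↔
      ((k ∈ L.map (fun u => pvKey u) ∨ k ∈ R.map (fun u => pvKey u)) ∧ pvCnt L k ≠ pvCnt R k) := by
  unfold pvChanged
  rw [PySem.Set.contains_eq_listContains]
  simp only [List.contains_iff_mem, List.mem_filter, PySem.Set.mem_union,
    PySem.Dict.keys_counter, PySem.Set.mem_ofList, bne_iff_ne, PySem.Dict.getD_counter]
  unfold pvCnt
  tauto

theorem pvCnt_pos_mem (X : List (List (String × String))) (k : String) (h : 0 < pvCnt X k) :
    k ∈ X.map (fun u => pvKey u) := by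
  unfold pvCnt at h
  exact List.count_pos_iff.mp (by exact_mod_cast h)

-- ===== VERDICT (by name: the statement is the Claim_ definition above) =====
theorem decide_units_to_highlight_spec : Claim_equal_decide_units_to_highlight := by
  intro L R hdom hpre
  unfold Spec_decide_units_to_highlight
  obtain ⟨selL, hsubL, heqL, hmarkL, hcovL⟩ := pvP1_spec L R
  obtain ⟨selR, hsubR, heqR, hmarkR, hcovR⟩ := pvP1_spec R L
  -- the marked-key union of A is exactly: occurring keys whose counts differ
  have hmapL : (pvP1 L R).map (fun i => pvKey (PySem.List.pyGetD L i [])) = selL.map (fun p => pvKey p.2) := by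
    rw [heqL, List.map_map]
    refine List.map_congr_left ?_
    intro p hp
    simp only [Function.comp_apply]
    rw [pvEnumGet L p (hsubL.mem hp)]
  have hmapR : (pvP1 R L).map (fun i => pvKey (PySem.List.pyGetD R i [])) = selR.map (fun p => pvKey p.2) := by
    rw [heqR, List.map_map]
    refine List.map_congr_left ?_
    intro p hp
    simp only [Function.comp_apply]
    rw [pvEnumGet R p (hsubR.mem hp)]
  have hAdk : ∀ k, PySem.Set.contains
      (PySem.Set.union
        (PySem.Set.ofList ((pvP1 L R).map (fun i => pvKey (PySem.List.pyGetD L i []))))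
        (PySem.Set.ofList ((pvP1 R L).map (fun i => pvKey (PySem.List.pyGetD R i []))))) k = true ↔
      ((k ∈ L.map (fun u => pvKey u) ∨ k ∈ R.map (fun u => pvKey u)) ∧ pvCnt L k ≠ pvCnt R k) := by
    intro k
    rw [PySem.Set.contains_iff, PySem.Set.mem_union, PySem.Set.mem_ofList, PySem.Set.mem_ofList,
      hmapL, hmapR]
    constructor
    · rintro (h | h)
      · obtain ⟨p, hp, hpe⟩ := List.mem_map.mp h
        subst hpe
        have hlt := hmarkL p hp
        have hU : pvKey p.2 ∈ L.map (fun u => pvKey u) :=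
          List.mem_map.mpr ⟨p.2, hsubL.mem hp |> pvEnumSnd L p, rfl⟩
        exact ⟨Or.inl hU, by omega⟩
      · obtain ⟨p, hp, hpe⟩ := List.mem_map.mp h
        subst hpe
        have hlt := hmarkR p hp
        have hU : pvKey p.2 ∈ R.map (fun u => pvKey u) :=
          List.mem_map.mpr ⟨p.2, hsubR.mem hp |> pvEnumSnd R p, rfl⟩
        exact ⟨Or.inr hU, by omega⟩
    · rintro ⟨_, hne⟩
      rcases lt_or_gt_of_ne hne with h | h
      · -- pvCnt L k < pvCnt R k: R side has the surplus
        have hkR : k ∈ R.map (fun u => pvKey u) := by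
          refine pvCnt_pos_mem R k ?_
          have : (0 : Int) ≤ pvCnt L k := by unfold pvCnt; positivity
          omega
        obtain ⟨p, hp, hpe⟩ := hcovR k hkR h
        exact Or.inr (List.mem_map.mpr ⟨p, hp, hpe⟩)
      · have hkL : k ∈ L.map (fun u => pvKey u) := by
          refine pvCnt_pos_mem L k ?_
          have : (0 : Int) ≤ pvCnt R k := by unfold pvCnt; positivity
          omega
        obtain ⟨p, hp, hpe⟩ := hcovL k hkL h
        exact Or.inl (List.mem_map.mpr ⟨p, hp, hpe⟩)
  -- per-side equality
  have hside : ∀ (U : List (List (String × String))) (S1 : List Int)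
      (sel : List (Int × List (String × String))),
      sel.Sublist (PySem.List.enumerate U 0) → S1 = sel.map (·.1) →
      (∀ p ∈ sel, PySem.Set.contains
        (PySem.Set.union
          (PySem.Set.ofList ((pvP1 L R).map (fun i => pvKey (PySem.List.pyGetD L i []))))
          (PySem.Set.ofList ((pvP1 R L).map (fun i => pvKey (PySem.List.pyGetD R i []))))) (pvKey p.2) = true) →
      (∀ p ∈ PySem.List.enumerate U 0, (PySem.Set.contains
        (PySem.Set.union
          (PySem.Set.ofList ((pvP1 L R).map (fun i => pvKey (PySem.List.pyGetD L i []))))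
          (PySem.Set.ofList ((pvP1 R L).map (fun i => pvKey (PySem.List.pyGetD R i []))))) (pvKey p.2) = true
        ↔ PySem.Set.contains (pvChanged L R) (pvKey p.2) = true)) →
      pvP2 U (PySem.Set.union
          (PySem.Set.ofList ((pvP1 L R).map (fun i => pvKey (PySem.List.pyGetD L i []))))
          (PySem.Set.ofList ((pvP1 R L).map (fun i => pvKey (PySem.List.pyGetD R i []))))) S1
        = pvMarkB U (pvChanged L R) := by
    intro U S1 sel hsub hS1 hselmark hag
    have hpwE : (PySem.List.enumerate U 0).Pairwise (fun p q => p.1 < q.1) :=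
      PySem.List.pairwise_lt_enumerate U 0
    have hS1pw : S1.Pairwise (· < ·) := by
      rw [hS1]
      exact List.pairwise_map.mpr (List.Pairwise.sublist hsub hpwE)
    refine sortedUnique _ _ (pvP2_pairwise _ _ _ hS1pw) ?_ ?_
    · rw [pvMarkB, pvMarkB_fold _ _ _ hpwE (by simp)]
      rw [List.nil_append]
      have hfs : (List.filter (fun p => PySem.Set.contains (pvChanged L R) (pvKey p.2)) (PySem.List.enumerate U 0)).Sublist (PySem.List.enumerate U 0) := List.filter_sublist
      exact List.pairwise_map.mpr (List.Pairwise.sublist hfs hpwE)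
    · intro j
      rw [pvP2, pvP2_mem, pvMarkB, pvMarkB_fold _ _ _ hpwE (by simp), List.nil_append]
      simp only [List.mem_map, List.mem_filter]
      constructor
      · rintro (hj | ⟨p, hp, hpc, hpe⟩)
        · rw [hS1] at hj
          obtain ⟨p, hp, hpe⟩ := List.mem_map.mp hj
          exact ⟨p, ⟨hsub.mem hp, (hag p (hsub.mem hp)).mp (hselmark p hp)⟩, hpe⟩
        · exact ⟨p, ⟨hp, (hag p hp).mp hpc⟩, hpe⟩
      · rintro ⟨p, ⟨hp, hpc⟩, hpe⟩
        exact Or.inr ⟨p, hp, (hag p hp).mpr hpc, hpe⟩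
  have hagL : ∀ p ∈ PySem.List.enumerate L 0, (PySem.Set.contains
      (PySem.Set.union
        (PySem.Set.ofList ((pvP1 L R).map (fun i => pvKey (PySem.List.pyGetD L i []))))
        (PySem.Set.ofList ((pvP1 R L).map (fun i => pvKey (PySem.List.pyGetD R i []))))) (pvKey p.2) = true
      ↔ PySem.Set.contains (pvChanged L R) (pvKey p.2) = true) := by
    intro p hp
    rw [hAdk, pvChanged_contains]
  have hagR : ∀ p ∈ PySem.List.enumerate R 0, (PySem.Set.contains
      (PySem.Set.union
        (PySem.Set.ofList ((pvP1 L R).map (fun i => pvKey (PySem.List.pyGetD L i []))))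
        (PySem.Set.ofList ((pvP1 R L).map (fun i => pvKey (PySem.List.pyGetD R i []))))) (pvKey p.2) = true
      ↔ PySem.Set.contains (pvChanged L R) (pvKey p.2) = true) := by
    intro p hp
    rw [hAdk, pvChanged_contains]
  have hselmarkL : ∀ p ∈ selL, PySem.Set.contains
      (PySem.Set.union
        (PySem.Set.ofList ((pvP1 L R).map (fun i => pvKey (PySem.List.pyGetD L i []))))
        (PySem.Set.ofList ((pvP1 R L).map (fun i => pvKey (PySem.List.pyGetD R i []))))) (pvKey p.2) = true := by
    intro p hp
    rw [PySem.Set.contains_iff, PySem.Set.mem_union, PySem.Set.mem_ofList, hmapL]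
    exact Or.inl (List.mem_map.mpr ⟨p, hp, rfl⟩)
  have hselmarkR : ∀ p ∈ selR, PySem.Set.contains
      (PySem.Set.union
        (PySem.Set.ofList ((pvP1 L R).map (fun i => pvKey (PySem.List.pyGetD L i []))))
        (PySem.Set.ofList ((pvP1 R L).map (fun i => pvKey (PySem.List.pyGetD R i []))))) (pvKey p.2) = true := by
    intro p hp
    rw [PySem.Set.contains_iff, PySem.Set.mem_union, PySem.Set.mem_ofList, PySem.Set.mem_ofList, hmapR]
    exact Or.inr (List.mem_map.mpr ⟨p, hp, rfl⟩)
  show decide_units_to_highlight L R = decide_units_to_highlight_alt L R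
  unfold decide_units_to_highlight decide_units_to_highlight_alt
  exact Prod.ext
    (hside L (pvP1 L R) selL hsubL heqL hselmarkL hagL)
    (hside R (pvP1 R L) selR hsubR heqR hselmarkR hagR)
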